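-- pv_equiv track=rewrite | github.com/serrano-s/NLPassignments-students | strip_tempcode_from_notebook.py | get_all_nonempty_lines_after_lineind
-- ===== SOURCE A (Python) =====
-- def get_all_nonempty_lines_after_lineind(lineind, cell_lines):
--     nonempty_lines = []
--     return_this = False
--     for line in cell_lines[lineind + 1:]:
--         line_contents = line.strip()
--         if line_contents == '':
--             if len(nonempty_lines) > 0:
--                 nonempty_lines.append(line_contents)
--         elif line_contents.startswith('#'):
--             nonempty_lines.append(line_contents)
--         else:
--             nonempty_lines.append(line_contents)
--             return_this = True
--     if return_this:
--         return nonempty_lines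
--     else:
--         return []
-- ===== SOURCE B (Python) =====
-- def get_all_nonempty_lines_after_lineind(lineind, cell_lines):
--     stripped = [line.strip() for line in cell_lines[lineind + 1:]]
--     i = 0
--     while i < len(stripped) and stripped[i] == '':
--         i += 1
--     result = stripped[i:]
--     has_code = any(l != '' and not l.startswith('#') for l in result)
--     return result if has_code else []
-- ===== Notes on version B (the rewrite author's own statement) =====
-- stated objective: simpler
-- what changed: Replaces A's single stateful loop carrying (accumulated lines, return_this flag) by three independent passes: strip-all via a comprehension, skip the leading blanks, then a separate any() test for a non-comment line deciding whether to return the slice or [].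
import Mathlib
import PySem

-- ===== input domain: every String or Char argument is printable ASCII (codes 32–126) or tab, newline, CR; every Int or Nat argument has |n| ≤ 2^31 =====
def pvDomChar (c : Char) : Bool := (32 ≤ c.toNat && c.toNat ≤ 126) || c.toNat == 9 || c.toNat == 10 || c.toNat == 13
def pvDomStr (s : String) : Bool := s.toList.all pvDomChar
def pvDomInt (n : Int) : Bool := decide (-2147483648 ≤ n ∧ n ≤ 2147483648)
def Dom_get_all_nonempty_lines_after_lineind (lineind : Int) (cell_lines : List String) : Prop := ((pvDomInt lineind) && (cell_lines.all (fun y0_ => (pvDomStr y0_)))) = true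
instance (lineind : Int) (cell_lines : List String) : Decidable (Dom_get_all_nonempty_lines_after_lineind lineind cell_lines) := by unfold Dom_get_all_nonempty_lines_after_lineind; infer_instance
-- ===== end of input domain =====

-- B replaces A's single stateful loop (accumulator + return_this flag) by three separate passes: strip all, skip leading blanks, then an any() test choosing the slice or []; same cost, plainer decomposition.


-- ===== PORT A =====
-- A's loop body, step for step: strip, three branches in order, state = (nonempty_lines, return_this)
def pvStepA (st : List String × Bool) (line : String) : List String × Bool :=
  let line_contents := PySem.Str.strip line
  if line_contents = "" then
    (if st.1.length > 0 then (st.1 ++ [line_contents], st.2) else st)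
  else if PySem.Str.startswith line_contents "#" then
    (st.1 ++ [line_contents], st.2)
  else
    (st.1 ++ [line_contents], true)

def get_all_nonempty_lines_after_lineind (lineind : Int) (cell_lines : List String) : List String :=
  let st := (PySem.List.slice cell_lines (some (lineind + 1)) none).foldl pvStepA ([], false)
  if st.2 then st.1 else []

-- ===== PORT B =====
-- B's while loop that skips the leading blank stripped lines (i, then stripped[i:])
def pvSkipBlanks : List String → List String
  | [] => []
  | l :: rest => if l = "" then pvSkipBlanks rest else l :: rest

def get_all_nonempty_lines_after_lineind_alt (lineind : Int) (cell_lines : List String) : List String :=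
  let stripped := (PySem.List.slice cell_lines (some (lineind + 1)) none).map PySem.Str.strip
  let result := pvSkipBlanks stripped
  let has_code := result.any (fun l => !(l == "") && !(PySem.Str.startswith l "#"))
  if has_code then result else []

-- ===== PRECONDITION & SPEC =====
def Spec_get_all_nonempty_lines_after_lineind (lineind : Int) (cell_lines : List String) (out : List String) : Prop := out = get_all_nonempty_lines_after_lineind_alt lineind cell_lines
instance (lineind : Int) (cell_lines : List String) (out : List String) : Decidable (Spec_get_all_nonempty_lines_after_lineind lineind cell_lines out) := by unfold Spec_get_all_nonempty_lines_after_lineind; infer_instance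

-- ===== CLAIM (what is proved, stated in full; the proofs are below) =====
def Claim_equal_get_all_nonempty_lines_after_lineind : Prop := ∀ (lineind : Int) (cell_lines : List String), Dom_get_all_nonempty_lines_after_lineind lineind cell_lines → Spec_get_all_nonempty_lines_after_lineind lineind cell_lines (get_all_nonempty_lines_after_lineind lineind cell_lines)

-- ===== LEMMAS AND PROOFS =====
def pvCode (l : String) : Bool := !(l == "") && !(PySem.Str.startswith l "#")

lemma pvCode_empty : pvCode "" = false := rfl

lemma pvCode_hash {c : String} (hs : PySem.Str.startswith c "#" = true) : pvCode c = false := by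
  simp only [pvCode, hs, Bool.not_true, Bool.and_false]

lemma pvCode_true {c : String} (hc : c ≠ "") (hs : ¬ PySem.Str.startswith c "#" = true) :
    pvCode c = true := by
  simp only [pvCode, Bool.and_eq_true, Bool.not_eq_true']
  exact ⟨beq_eq_false_iff_ne.mpr hc, Bool.eq_false_iff.mpr hs⟩

lemma pvFoldA_cons (l : List String) (acc : List String) (rt : Bool) (h : acc ≠ []) :
    l.foldl pvStepA (acc, rt) = (acc ++ l.map PySem.Str.strip, rt || (l.map PySem.Str.strip).any pvCode) := by
  induction l generalizing acc rt with
  | nil => simp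
  | cons a l ih =>
    simp only [List.foldl_cons, List.map_cons, List.any_cons, pvStepA]
    by_cases hc : PySem.Str.strip a = ""
    · rw [if_pos hc, if_pos (List.length_pos_iff.mpr h : acc.length > 0),
        ih (acc ++ [PySem.Str.strip a]) rt (by simp), hc, pvCode_empty]
      simp
    · rw [if_neg hc]
      by_cases hs : PySem.Str.startswith (PySem.Str.strip a) "#" = true
      · rw [if_pos hs, ih (acc ++ [PySem.Str.strip a]) rt (by simp), pvCode_hash hs]
        simp
      · rw [if_neg hs, ih (acc ++ [PySem.Str.strip a]) true (by simp), pvCode_true hc hs]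
        simp

lemma pvFoldA_nil (l : List String) (rt : Bool) :
    l.foldl pvStepA (([] : List String), rt)
      = (pvSkipBlanks (l.map PySem.Str.strip), rt || (l.map PySem.Str.strip).any pvCode) := by
  induction l generalizing rt with
  | nil => simp [pvSkipBlanks]
  | cons a l ih =>
    simp only [List.foldl_cons, List.map_cons, List.any_cons, pvStepA]
    by_cases hc : PySem.Str.strip a = ""
    · rw [if_pos hc, if_neg (by simp : ¬ (([] : List String).length > 0)), ih rt, hc, pvCode_empty,
        pvSkipBlanks]
      simp
    · rw [if_neg hc, show pvSkipBlanks (PySem.Str.strip a :: l.map PySem.Str.strip)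
          = PySem.Str.strip a :: l.map PySem.Str.strip by rw [pvSkipBlanks, if_neg hc]]
      by_cases hs : PySem.Str.startswith (PySem.Str.strip a) "#" = true
      · rw [if_pos hs, pvFoldA_cons l ([] ++ [PySem.Str.strip a]) rt (by simp), pvCode_hash hs]
        simp
      · rw [if_neg hs, pvFoldA_cons l ([] ++ [PySem.Str.strip a]) true (by simp), pvCode_true hc hs]
        simp

lemma pvAny_skipBlanks (s : List String) : (pvSkipBlanks s).any pvCode = s.any pvCode := by
  induction s with
  | nil => rfl
  | cons a s ih =>
    by_cases h : a = ""
    · rw [pvSkipBlanks, if_pos h, ih, List.any_cons, h, pvCode_empty, Bool.false_or]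
    · rw [pvSkipBlanks, if_neg h]

-- ===== VERDICT (by name: the statement is the Claim_ definition above) =====
theorem get_all_nonempty_lines_after_lineind_spec : Claim_equal_get_all_nonempty_lines_after_lineind := by
  intro lineind cell_lines _
  unfold Spec_get_all_nonempty_lines_after_lineind
  unfold get_all_nonempty_lines_after_lineind get_all_nonempty_lines_after_lineind_alt
  simp only [pvFoldA_nil, Bool.false_or]
  have h : ∀ s : List String, (s.any fun l => !(l == "") && !(PySem.Str.startswith l "#")) = s.any pvCode := fun _ => rfl
  rw [h, pvAny_skipBlanks]
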